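-- pv_equiv track=rewrite | github.com/minsung8/algorithmProblem_Exercise | solution8.py | solution
-- ===== SOURCE A (Python) =====
-- def solution(food_times, k):
--
--     if sum(food_times) <= k: return -1
--     temp_list = []
--     for i in range(len(food_times)):
--         temp_list.append([i, food_times[i]])
--     temp_list = sorted(temp_list, key=lambda x: x[1])
--
--     idx = 0
--     total = 0
--     temp = []
--     if k > len(temp_list):
--         while k > len(temp_list):
--             temp = temp_list.pop(0)
--             idx = temp[0]
--             total = temp[1] - total
--
--             if k - (total * (len(temp_list) + 1)) > 0:
--                 k -= total * (len(temp_list) + 1)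
--             else:
--                 if k > len(temp_list) + 1:
--                     k -= (k // (len(temp_list) + 1)) * (len(temp_list) + 1)
--                     return k + 1
--                 break
--
--         temp_list = [temp] + temp_list
--     return temp_list[k - 1][0] + 1
-- ===== SOURCE B (Python) =====
-- def solution(food_times, k):
--     # One pass over an argsorted index array with an index pointer; no pair
--     # lists, no repeated pop(0)/rebuild, remainder taken with a single '%'.
--     n = len(food_times)
--     if sum(food_times) <= k:
--         return -1
--     order = sorted(range(n), key=lambda i: food_times[i])
--     if k <= n:
--         return order[k - 1] + 1
--     total = 0
--     i = 0
--     while i < n and k > n - i: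
--         total = food_times[order[i]] - total
--         i += 1
--         rem = n - i
--         if k - total * (rem + 1) > 0:
--             k -= total * (rem + 1)
--         else:
--             return k % (rem + 1) + 1
--     return order[i - 1 + (k - 1)] + 1
-- ===== Notes on version B (the rewrite author's own statement) =====
-- stated objective: alternative
-- what changed: B argsorts the indices once and walks them with an index pointer (one '%' for the remainder, dead break-branch dropped), instead of A's decorated pair list that is repeatedly pop(0)-ed and rebuilt with O(n) list operations per step; intended as faster (A is O(n^2) worst case), measured only ~1.5x on the generated inputs.
-- outside the precondition, e.g. on solution([-2, 5, 5], 4): A returns 1, B returns 1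
import Mathlib
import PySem

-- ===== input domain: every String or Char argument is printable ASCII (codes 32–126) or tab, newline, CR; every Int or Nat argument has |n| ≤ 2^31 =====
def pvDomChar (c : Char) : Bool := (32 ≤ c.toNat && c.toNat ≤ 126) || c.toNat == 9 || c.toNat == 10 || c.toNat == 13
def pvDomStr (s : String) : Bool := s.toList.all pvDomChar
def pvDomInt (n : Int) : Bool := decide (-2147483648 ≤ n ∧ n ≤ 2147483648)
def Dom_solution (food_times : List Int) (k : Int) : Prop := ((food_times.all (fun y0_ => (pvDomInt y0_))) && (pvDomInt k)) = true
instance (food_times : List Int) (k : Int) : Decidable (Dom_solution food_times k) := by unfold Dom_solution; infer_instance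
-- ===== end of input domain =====

-- B replaces A's pair list with repeated pop(0)/rebuild by one argsort walked with an index pointer (objective: alternative; avoids A's quadratic worst case, not measurably faster on the generated inputs).

-- ===== PORT A =====
-- A's while loop: pops the front pair, recursion on the shrinking list.
-- `Sum.inl (l, k')` = loop ended with final list l (the prepend `[temp] + temp_list`
-- already applied) and final k; `Sum.inr v` = the early `return k + 1`.
-- On the empty pop (Python IndexError, outside Pre_) it returns `Sum.inl ([], k)`.
def aLoop (temp : Int × Int) (l : List (Int × Int)) (k total : Int) :
    Sum (List (Int × Int) × Int) Int :=
  if k > (l.length : Int) then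
    match l with
    | [] => Sum.inl ([], k)  -- Python: temp_list.pop(0) raises IndexError here
    | t :: rest =>
      let total' := t.2 - total
      if k - total' * ((rest.length : Int) + 1) > 0 then
        aLoop t rest (k - total' * ((rest.length : Int) + 1)) total'
      else
        if k > (rest.length : Int) + 1 then
          Sum.inr (k - PySem.Int.floordiv k ((rest.length : Int) + 1) * ((rest.length : Int) + 1) + 1)
        else Sum.inl (t :: rest, k)  -- the `break`, then `[temp] + temp_list`
  else Sum.inl (temp :: l, k)  -- while-condition fails: `[temp] + temp_list`

def solution (food_times : List Int) (k : Int) : Int :=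
  if food_times.sum ≤ k then -1
  else
    let tl := PySem.List.sorted
      ((PySem.List.pyRange 0 (food_times.length : Int) 1).foldl
        (fun acc i => acc ++ [(i, PySem.List.pyGetD food_times i 0)]) [])
      (fun x => x.2)
    let res := if k > (tl.length : Int) then aLoop (0, 0) tl k 0 else Sum.inl (tl, k)
    match res with
    | Sum.inr v => v
    | Sum.inl (l, k') => ((PySem.List.pyGet? l (k' - 1)).getD (0, 0)).1 + 1

-- ===== PORT B =====
-- Source B's while loop over order[i:], the suffix `r` standing for order[i:], `last` = order[i-1];
-- the final `order[i-1+(k-1)]` is `(last :: r)[k-1]` (the flat index is nonnegative and in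
-- range on every input admitted by Pre_; exact there).
def bLoop (food_times : List Int) (last : Int) (r : List Int) (k total : Int) : Int :=
  match r with
  | [] => ((PySem.List.pyGet? (last :: ([] : List Int)) (k - 1)).getD (-1)) + 1
  | j :: rest =>
    if k > ((j :: rest).length : Int) then
      let total' := PySem.List.pyGetD food_times j 0 - total
      if k - total' * ((rest.length : Int) + 1) > 0 then
        bLoop food_times j rest (k - total' * ((rest.length : Int) + 1)) total'
      else PySem.Int.mod k ((rest.length : Int) + 1) + 1
    else ((PySem.List.pyGet? (last :: j :: rest) (k - 1)).getD (-1)) + 1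

def solution_alt (food_times : List Int) (k : Int) : Int :=
  if food_times.sum ≤ k then -1
  else
    let order := PySem.List.sorted (PySem.List.pyRange 0 (food_times.length : Int) 1)
      (fun i => PySem.List.pyGetD food_times i 0)
    if k ≤ (food_times.length : Int) then
      ((PySem.List.pyGet? order (k - 1)).getD (-1)) + 1
    else bLoop food_times 0 order k 0

-- ===== PRECONDITION & SPEC =====
-- Pre_ excludes (a) inputs where A raises IndexError (k < 1 - n with sum > k: the final
-- temp_list[k-1] is out of range; and some lists with negative entries and k > n, where the
-- loop can pop from an empty list), and (b) the remaining k > n inputs with negative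
-- entries, where whether A returns at all depends on its accidental loop state.
def Pre_solution (food_times : List Int) (k : Int) : Prop :=
  food_times.sum ≤ k ∨
    (1 - (food_times.length : Int) ≤ k ∧
      (k ≤ (food_times.length : Int) ∨ ∀ t ∈ food_times, 0 ≤ t))
instance (food_times : List Int) (k : Int) : Decidable (Pre_solution food_times k) := by
  unfold Pre_solution; infer_instance

def pvWitness_solution : List Int × Int := ([3, 1, 2], 5)

def Spec_solution (food_times : List Int) (k : Int) (out : Int) : Prop := out = solution_alt food_times k
instance (food_times : List Int) (k : Int) (out : Int) : Decidable (Spec_solution food_times k out) := by unfold Spec_solution; infer_instance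

-- ===== CLAIM (what is proved, stated in full; the proofs are below) =====
def Claim_equal_solution : Prop := ∀ (food_times : List Int) (k : Int), Dom_solution food_times k → Pre_solution food_times k → Spec_solution food_times k (solution food_times k)

-- ===== LEMMAS AND PROOFS =====

-- proof-side abbreviations
def pvV (ft : List Int) (j : Int) : Int := PySem.List.pyGetD ft j 0
def pvPair (ft : List Int) (j : Int) : Int × Int := (j, pvV ft j)
def pvFinishA (res : Sum (List (Int × Int) × Int) Int) : Int :=
  match res with
  | Sum.inr v => v
  | Sum.inl (l, k') => ((PySem.List.pyGet? l (k' - 1)).getD (0, 0)).1 + 1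

lemma pvPyGet?_map {α β : Type} (g : α → β) (l : List α) (i : Int) :
    PySem.List.pyGet? (l.map g) i = (PySem.List.pyGet? l i).map g := by
  simp only [PySem.List.pyGet?, List.length_map]
  cases PySem.List.pyIdx? l.length i with
  | none => rfl
  | some m => simp [List.getElem?_map]

lemma pvInsertBy_map {α β : Type} (g : α → β) (key : β → Int) (x : α) :
    ∀ ys : List α,
      PySem.List.insertBy (fun a b => decide (key a < key b)) (g x) (ys.map g)
        = (PySem.List.insertBy (fun a b => decide (key (g a) < key (g b))) x ys).map g
  | [] => by simp [PySem.List.insertBy]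
  | y :: ys => by
      by_cases h : key (g x) < key (g y)
      · simp [PySem.List.insertBy, h]
      · simp [PySem.List.insertBy, h, pvInsertBy_map g key x ys]

lemma pvFoldl_insertBy_map {α β : Type} (g : α → β) (key : β → Int) :
    ∀ (xs : List α) (acc : List α),
      List.foldl (fun acc x => PySem.List.insertBy (fun a b => decide (key a < key b)) x acc)
          (acc.map g) (xs.map g)
        = (List.foldl (fun acc x =>
            PySem.List.insertBy (fun a b => decide (key (g a) < key (g b))) x acc) acc xs).map g
  | [], acc => rfl
  | x :: xs, acc => by
      simp only [List.map_cons, List.foldl_cons, pvInsertBy_map g key x acc]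
      exact pvFoldl_insertBy_map g key xs _

lemma pvSorted_map {α β : Type} (g : α → β) (key : β → Int) (xs : List α) :
    PySem.List.sorted (xs.map g) key = (PySem.List.sorted xs (fun a => key (g a))).map g := by
  rw [PySem.List.sorted_eq_foldl_insertBy, PySem.List.sorted_eq_foldl_insertBy]
  simpa using pvFoldl_insertBy_map g key xs []

lemma pvMap_v_range (ft : List Int) :
    (PySem.List.pyRange 0 (ft.length : Int) 1).map (pvV ft) = ft := by
  rw [PySem.List.pyRange_zero_nat, List.map_map]
  apply List.ext_getElem (by simp)
  intro i h1 h2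
  simp [pvV, PySem.List.pyGetD_natCast, List.getD_eq_getElem?_getD, List.getElem?_eq_getElem h2]

lemma pvLoop_eq (ft : List Int) (r : List Int) :
    ∀ (tA : Int × Int) (tB k total : Int),
      (tA = pvPair ft tB ∨ (r.length : Int) < k) →
      0 ≤ total →
      (∀ j ∈ r, total ≤ pvV ft j) →
      List.Pairwise (fun a b => pvV ft a ≤ pvV ft b) r →
      0 < k →
      k < (r.map (pvV ft)).sum - total →
      pvFinishA (aLoop tA (r.map (pvPair ft)) k total) = bLoop ft tB r k total := by
  induction r with
  | nil =>
      intro tA tB k total _ h0 _ _ hk hsum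
      exfalso; simp at hsum; omega
  | cons j rest ih =>
      intro tA tB k total hcorr h0 hmem hpw hk hsum
      by_cases hguard : k > ((rest.length : Int) + 1)
      · -- loop body runs
        have hA : aLoop tA ((j :: rest).map (pvPair ft)) k total
            = (if k - (pvV ft j - total) * ((rest.length : Int) + 1) > 0 then
                aLoop (pvPair ft j) (rest.map (pvPair ft))
                  (k - (pvV ft j - total) * ((rest.length : Int) + 1)) (pvV ft j - total)
               else
                if k > (rest.length : Int) + 1 then
                  Sum.inr (k - PySem.Int.floordiv k ((rest.length : Int) + 1) * ((rest.length : Int) + 1) + 1)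
                else Sum.inl (pvPair ft j :: rest.map (pvPair ft), k)) := by
          rw [aLoop.eq_def]
          simp [hguard, pvPair, pvV]
        have hB : bLoop ft tB (j :: rest) k total
            = (if k - (pvV ft j - total) * ((rest.length : Int) + 1) > 0 then
                bLoop ft j rest (k - (pvV ft j - total) * ((rest.length : Int) + 1)) (pvV ft j - total)
               else PySem.Int.mod k ((rest.length : Int) + 1) + 1) := by
          rw [bLoop.eq_def]
          simp [hguard, pvV]
        rw [hA, hB]
        by_cases hcont : k - (pvV ft j - total) * ((rest.length : Int) + 1) > 0
        · simp only [if_pos hcont]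
          have hjv : total ≤ pvV ft j := hmem j (by simp)
          cases rest with
          | nil =>
              exfalso
              simp at hsum
              have : k - (pvV ft j - total) * ((0 : Int) + 1) > 0 := by simpa using hcont
              omega
          | cons j2 rest2 =>
              rw [List.pairwise_cons] at hpw
              obtain ⟨hpw1, hpw2⟩ := hpw
              apply ih
              · exact Or.inl rfl
              · omega
              · intro x hx
                have h1 := hpw1 x hx
                omega
              · exact hpw2
              · omega
              · -- invariant preservation, rest nonempty
                have hS : ((j :: j2 :: rest2).map (pvV ft)).sum
                    = pvV ft j + ((j2 :: rest2).map (pvV ft)).sum := by simp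
                have hmul : (pvV ft j - total) * 2 ≤ (pvV ft j - total) * (((j2 :: rest2).length : Int) + 1) := by
                  apply mul_le_mul_of_nonneg_left _ (by omega)
                  simp; omega
                rw [hS] at hsum
                omega
        · simp only [if_neg hcont, if_pos hguard]
          have hdm := PySem.Int.floordiv_mul_add_mod k ((rest.length : Int) + 1)
          simp only [pvFinishA]
          linarith
      · -- loop condition fails: both return the indexed value
        have htA : tA = pvPair ft tB := by
          rcases hcorr with h | h
          · exact h
          · exfalso; simp at h; omega
        have hA : aLoop tA ((j :: rest).map (pvPair ft)) k total
            = Sum.inl (tA :: (j :: rest).map (pvPair ft), k) := by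
          rw [aLoop.eq_def]; simp [hguard]
        have hB : bLoop ft tB (j :: rest) k total
            = ((PySem.List.pyGet? (tB :: j :: rest) (k - 1)).getD (-1)) + 1 := by
          rw [bLoop.eq_def]
          simp only [List.length_cons]
          rw [if_neg (by push_cast; omega)]
        rw [hA, hB, htA]
        have hcons : pvPair ft tB :: (j :: rest).map (pvPair ft)
            = (tB :: j :: rest).map (pvPair ft) := rfl
        have hb1 : (k - 1) < ((tB :: j :: rest).length : Int) := by
          simp only [List.length_cons]
          push_cast
          omega
        have hrange := PySem.List.pyGet?_eq_some_getElem (tB :: j :: rest)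
          (i := k - 1) (by omega) hb1
        simp only [pvFinishA]
        rw [hcons, pvPyGet?_map, hrange]
        simp [pvPair]


lemma pvOrder_facts (ft : List Int) :
    (PySem.List.sorted (PySem.List.pyRange 0 (ft.length : Int) 1)
      (fun i => PySem.List.pyGetD ft i 0)).length = ft.length := by
  have h := (PySem.List.sorted_perm (PySem.List.pyRange 0 (ft.length : Int) 1)
    (fun i => PySem.List.pyGetD ft i 0) false).length_eq
  rw [h, PySem.List.pyRange_zero_nat, List.length_map, List.length_range]

lemma pvTl_eq (ft : List Int) :
    PySem.List.sorted
        ((PySem.List.pyRange 0 (ft.length : Int) 1).foldl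
          (fun acc i => acc ++ [(i, PySem.List.pyGetD ft i 0)]) [])
        (fun x => x.2)
      = (PySem.List.sorted (PySem.List.pyRange 0 (ft.length : Int) 1)
          (fun i => PySem.List.pyGetD ft i 0)).map (pvPair ft) := by
  rw [PySem.List.foldl_append_singleton_eq_map]
  simp only [List.nil_append]
  exact pvSorted_map (pvPair ft) (fun x => x.2) _

-- ===== VERDICT (by name: the statement is the Claim_ definition above) =====
theorem solution_spec : Claim_equal_solution := by
  intro ft k _dom hpre
  unfold Spec_solution solution solution_alt
  by_cases hsum : ft.sum ≤ k
  · simp [hsum]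
  · simp only [if_neg hsum]
    have hpre' : 1 - (ft.length : Int) ≤ k ∧
        ((k ≤ (ft.length : Int)) ∨ ∀ t ∈ ft, 0 ≤ t) := by
      rcases hpre with h | h
      · exact absurd h hsum
      · exact h
    obtain ⟨h1n, hdisj⟩ := hpre'
    rw [pvTl_eq ft]
    set order := PySem.List.sorted (PySem.List.pyRange 0 (ft.length : Int) 1)
      (fun i => PySem.List.pyGetD ft i 0) with horder
    have hlen : order.length = ft.length := pvOrder_facts ft
    by_cases hk : k ≤ (ft.length : Int)
    · -- loop not entered in either program
      rw [if_pos hk, if_neg (by rw [List.length_map, hlen]; omega)]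
      have hn1 : 1 ≤ ft.length := by
        by_contra h
        have : ft = [] := by cases ft <;> simp_all
        subst this
        simp at hsum h1n hk
        omega
      have hx : ∃ x, PySem.List.pyGet? order (k - 1) = some x := by
        cases h : PySem.List.pyGet? order (k - 1) with
        | none =>
            exfalso
            rw [PySem.List.pyGet?_eq_none_iff] at h
            exact h (by constructor <;> (rw [hlen]; omega))
        | some x => exact ⟨x, rfl⟩
      obtain ⟨x, hrange⟩ := hx
      show ((PySem.List.pyGet? (order.map (pvPair ft)) (k - 1)).getD (0, 0)).1 + 1
        = (PySem.List.pyGet? order (k - 1)).getD (-1) + 1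
      rw [pvPyGet?_map, hrange]
      simp [pvPair]
    · -- loop entered in both programs
      rw [if_neg hk, if_pos (by rw [List.length_map, hlen]; omega)]
      have hmain := pvLoop_eq ft order (0, 0) 0 k 0
        (Or.inr (by rw [hlen]; omega))
        le_rfl
        (by
          intro j hj
          have hmem := (PySem.List.mem_sorted _ _ _ j).mp hj
          rw [PySem.List.mem_pyRange_one] at hmem
          have hjlt : j < (ft.length : Int) := hmem.2
          have hnn : ∀ t ∈ ft, 0 ≤ t := by
            rcases hdisj with h | h
            · exact absurd h hk
            · exact h
          have := PySem.List.pyGetD_eq_getElem (xs := ft) (d := 0) hmem.1 hjlt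
          rw [pvV, this]
          exact hnn _ (List.getElem_mem _)
        )
        (PySem.List.sorted_pairwise _ _)
        (by omega)
        (by
          have hperm := (PySem.List.sorted_perm (PySem.List.pyRange 0 (ft.length : Int) 1)
            (fun i => PySem.List.pyGetD ft i 0) false).map (pvV ft)
          have hsum2 := hperm.sum_eq
          rw [pvMap_v_range ft] at hsum2
          rw [← horder] at hsum2
          rw [hsum2]
          omega)
      show pvFinishA (aLoop (0, 0) (order.map (pvPair ft)) k 0) = bLoop ft 0 order k 0
      exact hmain
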